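-- pv_equiv track=rewrite | github.com/SergeyFeduk/ConnectomeToolkit | connectome_toolkit/dataset_baker/position_extractor_utils.py | preprocess_position_format
-- ===== SOURCE A (Python) =====
-- def preprocess_position_format(position_format : str) -> list[int]:
--     components = ['X', 'Y', 'Z']
--     component_indices = []
--     for component in components:
--         try:
--             index = position_format.index(component)
--             component_indices.append(index)
--         except ValueError:
--             raise ValueError(f"Position format must contain component: {component}")
--
--     if len(component_indices) != 3:
--         raise ValueError(f"Position format must contain exactly X, Y, and Z components")
--
--     component_indices.sort() # Ensure indices are in order X, Y, Z
--     return component_indices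
-- ===== SOURCE B (Python) =====
-- def preprocess_position_format(position_format: str) -> list[int]:
--     # Single pass: emit the index whenever X, Y or Z appears for the first time.
--     # Indices come out already sorted (string order), so no sort is needed.
--     result = []
--     seen = set()
--     for i, ch in enumerate(position_format):
--         if ch in ('X', 'Y', 'Z') and ch not in seen:
--             seen.add(ch)
--             result.append(i)
--     for component in ['X', 'Y', 'Z']:
--         if component not in seen:
--             raise ValueError(f"Position format must contain component: {component}")
--     return result
-- ===== Notes on version B (the rewrite author's own statement) =====
-- stated objective: alternative
-- what changed: B makes a single forward pass emitting each of X,Y,Z's index the first time it is seen, producing the result already in increasing order, so both the three per-component searches and the final sort disappear.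
import Mathlib
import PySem

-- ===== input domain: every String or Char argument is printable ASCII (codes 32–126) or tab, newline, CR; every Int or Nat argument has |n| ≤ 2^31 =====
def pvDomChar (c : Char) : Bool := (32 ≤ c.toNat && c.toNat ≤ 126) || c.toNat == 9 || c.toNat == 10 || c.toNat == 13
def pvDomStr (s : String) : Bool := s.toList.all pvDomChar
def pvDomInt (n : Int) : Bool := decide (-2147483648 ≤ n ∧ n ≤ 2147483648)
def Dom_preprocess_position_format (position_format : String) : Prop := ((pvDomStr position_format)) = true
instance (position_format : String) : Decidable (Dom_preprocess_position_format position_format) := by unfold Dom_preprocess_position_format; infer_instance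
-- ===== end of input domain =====

-- B replaces A's three str.index scans plus a sort by ONE forward pass that emits each of
-- X,Y,Z's index the first time it is seen: the result is built already in increasing order.

-- ===== PORT A =====
-- position_format.index(component) is PySem.Str.find; under Pre_ every component is
-- present, so find equals index. A's 'len != 3' guard is unreachable (the loop always
-- appends exactly 3 elements) and is therefore not transcribed.
def preprocess_position_format (position_format : String) : List Int :=
  let components : List String := ["X", "Y", "Z"]
  let component_indices : List Int :=
    components.foldl (fun acc component => acc ++ [PySem.Str.find position_format component]) []
  PySem.List.sorted component_indices (fun x => x) false

-- ===== PORT B =====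
-- One enumerate pass with state (result, seen); Python's final for-loop only raises
-- ValueError (excluded by Pre_) and is therefore not transcribed; result is returned.
def preprocess_position_format_alt (position_format : String) : List Int :=
  let st : List Int × PySem.Set Char :=
    (PySem.List.enumerate position_format.toList 0).foldl
      (fun st p =>
        if (p.2 == 'X' || p.2 == 'Y' || p.2 == 'Z') && !(PySem.Set.contains st.2 p.2) then
          (st.1 ++ [p.1], PySem.Set.add st.2 p.2)
        else st)
      ([], PySem.Set.empty)
  st.1

-- ===== PRECONDITION & SPEC =====
-- A raises ValueError exactly when one of 'X','Y','Z' is absent; both programs raise there.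
def Pre_preprocess_position_format (position_format : String) : Prop :=
  'X' ∈ position_format.toList ∧ 'Y' ∈ position_format.toList ∧ 'Z' ∈ position_format.toList
instance (position_format : String) : Decidable (Pre_preprocess_position_format position_format) := by unfold Pre_preprocess_position_format; infer_instance
def pvWitness_preprocess_position_format : String := "XqYZ"
def Spec_preprocess_position_format (position_format : String) (out : List Int) : Prop := out = preprocess_position_format_alt position_format
instance (position_format : String) (out : List Int) : Decidable (Spec_preprocess_position_format position_format out) := by unfold Spec_preprocess_position_format; infer_instance

-- ===== CLAIM (what is proved, stated in full; the proofs are below) =====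
def Claim_equal_preprocess_position_format : Prop := ∀ (position_format : String), Dom_preprocess_position_format position_format → Pre_preprocess_position_format position_format → Spec_preprocess_position_format position_format (preprocess_position_format position_format)

-- ===== LEMMAS AND PROOFS =====

-- Pure recursion mirroring B's fold step (proof helper).
def fspec : List Char → Int → PySem.Set Char → List Int
  | [], _, _ => []
  | a :: t, k, seen =>
    if (a == 'X' || a == 'Y' || a == 'Z') && !(PySem.Set.contains seen a) then
      k :: fspec t (k + 1) (PySem.Set.add seen a)
    else fspec t (k + 1) seen

-- B's fold unfolds to fspec.
theorem fold_eq_fspec (cs : List Char) : ∀ (k : Int) (acc : List Int) (seen : PySem.Set Char),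
    ((PySem.List.enumerate cs k).foldl
      (fun st p =>
        if (p.2 == 'X' || p.2 == 'Y' || p.2 == 'Z') && !(PySem.Set.contains st.2 p.2) then
          (st.1 ++ [p.1], PySem.Set.add st.2 p.2)
        else st)
      (acc, seen)).1 = acc ++ fspec cs k seen := by
  induction cs with
  | nil => intro k acc seen; simp [PySem.List.enumerate_nil, fspec]
  | cons a t ih =>
    intro k acc seen
    rw [PySem.List.enumerate_cons, List.foldl_cons, fspec]
    by_cases h : ((a == 'X' || a == 'Y' || a == 'Z') && !(PySem.Set.contains seen a)) = true
    · simp only [h, if_true]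
      rw [ih (k + 1) (acc ++ [k]) (PySem.Set.add seen a)]
      simp
    · simp only [h, if_false, Bool.false_eq_true]
      exact ih (k + 1) acc seen

-- Every element of fspec is ≥ the running index.
theorem fspec_lower (cs : List Char) : ∀ (k : Int) (seen : PySem.Set Char) (i : Int),
    i ∈ fspec cs k seen → k ≤ i := by
  induction cs with
  | nil => intro k seen i h; simp [fspec] at h
  | cons a t ih =>
    intro k seen i h
    rw [fspec] at h
    split_ifs at h with hc
    · rcases List.mem_cons.mp h with rfl | h'
      · exact le_refl i
      · have := ih (k + 1) (PySem.Set.add seen a) i h'; omega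
    · have := ih (k + 1) seen i h; omega

-- fspec is strictly increasing.
theorem fspec_pairwise (cs : List Char) : ∀ (k : Int) (seen : PySem.Set Char),
    (fspec cs k seen).Pairwise (· < ·) := by
  induction cs with
  | nil => intro k seen; simp [fspec]
  | cons a t ih =>
    intro k seen
    rw [fspec]
    split_ifs with hc
    · refine List.pairwise_cons.mpr ⟨?_, ih (k + 1) (PySem.Set.add seen a)⟩
      intro i hi
      have := fspec_lower t (k + 1) (PySem.Set.add seen a) i hi; omega
    · exact ih (k + 1) seen

-- contains = false, as a Prop (glue for fspec_mem).
theorem contains_eq_false_iff {s : PySem.Set Char} {x : Char} :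
    PySem.Set.contains s x = false ↔ x ∉ s := by
  rw [← PySem.Set.contains_iff]
  cases PySem.Set.contains s x <;> simp

-- Membership in fspec: exactly the offset first occurrences of the X/Y/Z not already seen.
theorem fspec_mem (cs : List Char) : ∀ (k : Int) (seen : PySem.Set Char) (i : Int),
    i ∈ fspec cs k seen ↔
      ∃ c, (c = 'X' ∨ c = 'Y' ∨ c = 'Z') ∧ PySem.Set.contains seen c = false ∧ c ∈ cs ∧
        i = k + (cs.idxOf c : Int) := by
  induction cs with
  | nil => intro k seen i; simp [fspec]
  | cons a t ih =>
    intro k seen i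
    rw [fspec]
    split_ifs with hc
    · -- a is X/Y/Z and unseen
      have haXYZ : a = 'X' ∨ a = 'Y' ∨ a = 'Z' := by
        rcases Bool.and_eq_true_iff.mp hc with ⟨h1, _⟩
        rcases Bool.or_eq_true_iff.mp h1 with h | h2
        · rcases Bool.or_eq_true_iff.mp h with h | h
          · exact Or.inl (by exact_mod_cast eq_of_beq h)
          · exact Or.inr (Or.inl (by exact_mod_cast eq_of_beq h))
        · exact Or.inr (Or.inr (by exact_mod_cast eq_of_beq h2))
      have haSeen : PySem.Set.contains seen a = false := by
        rcases Bool.and_eq_true_iff.mp hc with ⟨_, h2⟩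
        simpa using h2
      constructor
      · intro h
        rcases List.mem_cons.mp h with rfl | h'
        · exact ⟨a, haXYZ, haSeen, List.mem_cons_self, by simp [List.idxOf_cons_self]⟩
        · obtain ⟨c, hcx, hcs, hct, hi⟩ := (ih (k + 1) (PySem.Set.add seen a) i).mp h'
          have hca : c ≠ a := by
            intro rfl'; subst rfl'
            exact (contains_eq_false_iff.mp hcs) ((PySem.Set.mem_add _ _ _).mpr (Or.inr rfl))
          have hcs' : PySem.Set.contains seen c = false := by
            rw [contains_eq_false_iff] at hcs ⊢
            intro hmem
            exact hcs ((PySem.Set.mem_add _ _ _).mpr (Or.inl hmem))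
          refine ⟨c, hcx, hcs', List.mem_cons_of_mem a hct, ?_⟩
          have hb : (a == c) = false := beq_eq_false_iff_ne.mpr (fun h => hca h.symm)
          rw [List.idxOf_cons, hb]
          simp only [cond_false]
          push_cast at hi ⊢; omega
      · rintro ⟨c, hcx, hcs, hct, hi⟩
        by_cases hca : c = a
        · subst hca
          rw [List.idxOf_cons_self] at hi
          simp only [Nat.cast_zero, add_zero] at hi
          exact List.mem_cons.mpr (Or.inl hi)
        · have hmt : c ∈ t := by
            rcases List.mem_cons.mp hct with h | h
            · exact absurd h hca
            · exact h
          apply List.mem_cons_of_mem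
          rw [ih (k + 1) (PySem.Set.add seen a) i]
          have hcs' : PySem.Set.contains (PySem.Set.add seen a) c = false := by
            rw [contains_eq_false_iff] at hcs ⊢
            intro hmem
            rcases (PySem.Set.mem_add _ _ _).mp hmem with h | h
            · exact hcs h
            · exact hca h
          refine ⟨c, hcx, hcs', hmt, ?_⟩
          have hb : (a == c) = false := beq_eq_false_iff_ne.mpr (fun h => hca h.symm)
          rw [List.idxOf_cons, hb] at hi
          simp only [cond_false] at hi
          push_cast at hi ⊢; omega
    · -- a skipped: a not X/Y/Z, or a already seen
      rw [ih (k + 1) seen i]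
      constructor
      · rintro ⟨c, hcx, hcs, hct, hi⟩
        have hca : c ≠ a := by
          intro rfl'; subst rfl'
          apply hc
          rw [Bool.and_eq_true]
          constructor
          · rcases hcx with rfl | rfl | rfl <;> simp
          · simp only [Bool.not_eq_true']
            exact hcs
        refine ⟨c, hcx, hcs, List.mem_cons_of_mem a hct, ?_⟩
        have hb : (a == c) = false := beq_eq_false_iff_ne.mpr (fun h => hca h.symm)
        rw [List.idxOf_cons, hb]
        simp only [cond_false]
        push_cast at hi ⊢; omega
      · rintro ⟨c, hcx, hcs, hct, hi⟩
        have hca : c ≠ a := by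
          intro rfl'; subst rfl'
          apply hc
          rw [Bool.and_eq_true]
          constructor
          · rcases hcx with rfl | rfl | rfl <;> simp
          · simp only [Bool.not_eq_true']
            exact hcs
        have hmt : c ∈ t := by
          rcases List.mem_cons.mp hct with h | h
          · exact absurd h hca
          · exact h
        refine ⟨c, hcx, hcs, hmt, ?_⟩
        have hb : (a == c) = false := beq_eq_false_iff_ne.mpr (fun h => hca h.symm)
        rw [List.idxOf_cons, hb] at hi
        simp only [cond_false] at hi
        push_cast at hi ⊢; omega

-- A's str.index on a one-character needle is the first-occurrence index.
theorem find_singleton_eq_idxOf (cs : List Char) (c : Char) (h : c ∈ cs) :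
    PySem.Chars.find cs [c] = (cs.idxOf c : Int) := by
  have hinf : [c] <:+: cs := by
    obtain ⟨s, t, rfl⟩ := List.append_of_mem h
    exact ⟨s, t, by simp⟩
  have hne : PySem.Chars.find cs [c] ≠ -1 := by
    intro hEq
    rw [PySem.Chars.find_eq_neg_one_iff] at hEq
    exact hEq hinf
  have hne0 : PySem.Chars.findFrom cs [c] 0 none ≠ -1 := by
    rwa [PySem.Chars.findFrom_zero]
  obtain ⟨hle, hpre, hmin⟩ := PySem.Chars.findFrom_natCast_spec cs [c] 0 (by omega) hne0
  simp only [Nat.cast_zero, PySem.Chars.findFrom_zero] at hle hpre hmin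
  set r := PySem.Chars.find cs [c] with hr
  have hcast : r = (r.toNat : Int) := (Int.toNat_of_nonneg (by exact_mod_cast hle)).symm
  set n := r.toNat with hn
  have hget : cs[n]? = some c := by
    obtain ⟨t, ht⟩ := hpre
    rw [← List.head?_drop, ← ht]; rfl
  have hlen : n < cs.length := by
    by_contra hge
    rw [List.getElem?_eq_none (by omega)] at hget
    cases hget
  have hgetE : cs[n] = c := by
    have := List.getElem?_eq_getElem hlen
    rw [this] at hget; exact Option.some.inj hget
  have hmin' : ∀ j, j < n → cs[j]? ≠ some c := by
    intro j hj hgj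
    apply hmin j (Nat.zero_le j) hj
    have hjl : j < cs.length := by
      by_contra hge
      rw [List.getElem?_eq_none (by omega)] at hgj
      cases hgj
    refine ⟨cs.drop (j + 1), ?_⟩
    have : cs[j] = c := by
      have := List.getElem?_eq_getElem hjl
      rw [this] at hgj; exact Option.some.inj hgj
    rw [← this]
    simp [List.getElem_cons_drop]
  have : cs.idxOf c = n := by
    show cs.findIdx (· == c) = n
    rw [List.findIdx_eq hlen]
    constructor
    · simp [hgetE]
    · intro j hj
      have := hmin' j hj
      have hjl : j < cs.length := by omega
      rw [List.getElem?_eq_getElem hjl] at this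
      simp only [beq_eq_false_iff_ne, ne_eq]
      intro hcj
      exact this (by rw [hcj])
  rw [this]
  exact hcast

-- First-occurrence indices of distinct present characters are distinct.
theorem idxOf_ne_of_mem (cs : List Char) (c d : Char) (hc : c ∈ cs) (hcd : c ≠ d) :
    cs.idxOf c ≠ cs.idxOf d := by
  intro h
  have hl : cs.idxOf c < cs.length := List.idxOf_lt_length_of_mem hc
  have hl' : cs.idxOf d < cs.length := h ▸ hl
  have h1 : cs[cs.idxOf c] = c := List.getElem_idxOf hl
  have h2 : cs[cs.idxOf d] = d := List.getElem_idxOf hl'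
  apply hcd
  rw [← h1, ← h2]
  simp [h]

-- ===== VERDICT (by name: the statement is the Claim_ definition above) =====
theorem preprocess_position_format_spec : Claim_equal_preprocess_position_format := by
  intro s _hdom hpre
  obtain ⟨hx, hy, hz⟩ := hpre
  unfold Spec_preprocess_position_format preprocess_position_format preprocess_position_format_alt
  simp only [List.foldl_cons, List.foldl_nil, List.nil_append]
  rw [fold_eq_fspec s.toList 0 [] PySem.Set.empty, List.nil_append]
  have hfind : ∀ (sub : String) (c : Char), sub.toList = [c] → c ∈ s.toList →
      PySem.Str.find s sub = (s.toList.idxOf c : Int) := by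
    intro sub c hsub hc
    simp only [PySem.Str.find]
    rw [hsub, find_singleton_eq_idxOf _ _ hc]
  rw [hfind "X" 'X' rfl hx, hfind "Y" 'Y' rfl hy, hfind "Z" 'Z' rfl hz]
  -- the one-pass list is a strictly increasing rearrangement of [iX, iY, iZ]
  apply (PySem.List.sorted_eq_of_perm_of_pairwise_lt _ _ _ ?_ ?_)
  · -- Perm: both nodup, same membership
    have hBnd : (fspec s.toList 0 PySem.Set.empty).Nodup :=
      (fspec_pairwise s.toList 0 PySem.Set.empty).imp (fun h => ne_of_lt h)
    have hXY := idxOf_ne_of_mem s.toList 'X' 'Y' hx (by decide)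
    have hXZ := idxOf_ne_of_mem s.toList 'X' 'Z' hx (by decide)
    have hYZ := idxOf_ne_of_mem s.toList 'Y' 'Z' hy (by decide)
    have hAnd : ([(s.toList.idxOf 'X' : Int), (s.toList.idxOf 'Y' : Int),
        (s.toList.idxOf 'Z' : Int)]).Nodup := by
      simp only [List.nodup_cons, List.mem_cons, not_or, List.not_mem_nil, not_false_iff,
        List.nodup_nil, and_true, Nat.cast_inj]
      exact ⟨⟨hXY, hXZ⟩, hYZ⟩
    refine (List.perm_ext_iff_of_nodup hBnd hAnd).mpr ?_
    intro i
    rw [fspec_mem s.toList 0 PySem.Set.empty i]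
    constructor
    · rintro ⟨c, hcx, _, _, hi⟩
      rcases hcx with rfl | rfl | rfl <;> simp [hi]
    · intro h
      simp only [List.mem_cons, List.not_mem_nil, or_false] at h
      rcases h with rfl | rfl | rfl
      · exact ⟨'X', Or.inl rfl, rfl, hx, by simp⟩
      · exact ⟨'Y', Or.inr (Or.inl rfl), rfl, hy, by simp⟩
      · exact ⟨'Z', Or.inr (Or.inr rfl), rfl, hz, by simp⟩
  · exact fspec_pairwise s.toList 0 PySem.Set.empty
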